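-- pv_equiv track=rewrite | github.com/ED-Daniel/reed-muller | reed_muller.py | _generate_all_rows
-- ===== SOURCE A (Python) =====
-- import operator
-- from functools import reduce
--
-- def _construct_vector(m, i):
--     return ([1] * (2 ** (m - i - 1)) + [0] * (2 ** (m - i - 1))) * (2**i)
--
-- def _vector_mult(*vecs):
--     assert len(set(map(len, vecs))) == 1
--     return list(map(lambda a: reduce(operator.mul, a, 1), zip(*vecs)))
--
-- def _vector_neg(x):
--     return list(map(lambda a: 1 - a, x))
--
-- def _generate_all_rows(m, S):
--     if not S:
--         return [[1] * (2**m)]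
--
--     i, Srest = S[0], S[1:]
--     Srest_rows = _generate_all_rows(m, Srest)
--     xi_row = _construct_vector(m, i)
--     not_xi_row = _vector_neg(xi_row)
--     return [_vector_mult(xi_row, row) for row in Srest_rows] + [
--         _vector_mult(not_xi_row, row) for row in Srest_rows
--     ]
-- ===== SOURCE B (Python) =====
-- import operator
-- from functools import reduce
--
-- def _construct_vector(m, i):
--     return ([1] * (2 ** (m - i - 1)) + [0] * (2 ** (m - i - 1))) * (2**i)
--
-- def _vector_mult(*vecs):
--     assert len(set(map(len, vecs))) == 1
--     return list(map(lambda a: reduce(operator.mul, a, 1), zip(*vecs)))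
--
-- def _vector_neg(x):
--     return list(map(lambda a: 1 - a, x))
--
-- def _generate_all_rows(m, S):
--     # Iterative version: fold over S right-to-left, doubling the row list each step.
--     rows = [[1] * (2**m)]
--     for i in reversed(S):
--         xi_row = _construct_vector(m, i)
--         not_xi_row = _vector_neg(xi_row)
--         rows = [_vector_mult(xi_row, r) for r in rows] + [
--             _vector_mult(not_xi_row, r) for r in rows
--         ]
--     return rows
-- ===== Notes on version B (the rewrite author's own statement) =====
-- stated objective: alternative
-- what changed: Replaced the recursion on S by an explicit iterative fold: start from the single all-ones row and, scanning S right-to-left, double the row list at each step (xi-half then not-xi-half), so no call stack and no per-level reconstruction of the suffix result.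
import Mathlib
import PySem

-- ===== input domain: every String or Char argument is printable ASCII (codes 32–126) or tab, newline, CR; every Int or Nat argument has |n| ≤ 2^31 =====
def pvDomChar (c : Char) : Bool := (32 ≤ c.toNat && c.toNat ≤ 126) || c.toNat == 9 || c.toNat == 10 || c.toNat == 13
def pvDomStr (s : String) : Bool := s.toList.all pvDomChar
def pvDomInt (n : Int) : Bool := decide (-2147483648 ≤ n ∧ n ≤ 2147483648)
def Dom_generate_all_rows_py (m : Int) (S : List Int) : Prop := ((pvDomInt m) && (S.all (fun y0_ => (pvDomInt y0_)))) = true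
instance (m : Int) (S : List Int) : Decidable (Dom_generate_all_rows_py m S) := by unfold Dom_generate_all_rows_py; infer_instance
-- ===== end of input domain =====

-- B replaces A's recursion on S by an explicit right-to-left fold over S (same helpers, no call stack); return values proved equal.
-- ===== PORT A =====
-- the 'if' only makes the computation total: when i < 0 or m - i - 1 < 0, Python's 2** is
-- fractional and '_construct_vector' raises TypeError (outside Pre_); no value is claimed there
def pvConstructVector (m i : Int) : List Int :=
  if i < 0 ∨ m - i - 1 < 0 then [] else
  (List.replicate (2 ^ i.toNat)
    (List.replicate (2 ^ (m - i - 1).toNat) (1 : Int) ++ List.replicate (2 ^ (m - i - 1).toNat) (0 : Int))).flatten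

def pvVectorMult (xs ys : List Int) : List Int :=
  (xs.zip ys).map (fun a => 1 * a.1 * a.2)

def pvVectorNeg (x : List Int) : List Int :=
  x.map (fun a => 1 - a)

def generate_all_rows_py (m : Int) (S : List Int) : List (List Int) :=
  match S with
  | [] => [List.replicate (2 ^ m.toNat) (1 : Int)]
  | i :: Srest =>
    let Srest_rows := generate_all_rows_py m Srest
    let xi_row := pvConstructVector m i
    let not_xi_row := pvVectorNeg xi_row
    Srest_rows.map (fun row => pvVectorMult xi_row row) ++
      Srest_rows.map (fun row => pvVectorMult not_xi_row row)

-- ===== PORT B =====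
def pvStep (m : Int) (rows : List (List Int)) (i : Int) : List (List Int) :=
  let xi_row := pvConstructVector m i
  let not_xi_row := pvVectorNeg xi_row
  rows.map (fun r => pvVectorMult xi_row r) ++ rows.map (fun r => pvVectorMult not_xi_row r)

def generate_all_rows_py_alt (m : Int) (S : List Int) : List (List Int) :=
  S.reverse.foldl (pvStep m) [List.replicate (2 ^ m.toNat) (1 : Int)]

-- ===== PRECONDITION & SPEC =====
-- Pre_ excludes exactly the inputs where Python A raises TypeError: a negative m, or an
-- exponent index i outside [0, m), makes 2**(m-i-1) (or 2**m / 2**i) a float and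
-- 'list * float' raises; B raises there too.
def Pre_generate_all_rows_py (m : Int) (S : List Int) : Prop :=
  0 ≤ m ∧ ∀ i ∈ S, 0 ≤ i ∧ i < m
instance (m : Int) (S : List Int) : Decidable (Pre_generate_all_rows_py m S) := by
  unfold Pre_generate_all_rows_py; infer_instance
def pvWitness_generate_all_rows_py : Int × List Int := (2, [0, 1])

def Spec_generate_all_rows_py (m : Int) (S : List Int) (out : List (List Int)) : Prop := out = generate_all_rows_py_alt m S
instance (m : Int) (S : List Int) (out : List (List Int)) : Decidable (Spec_generate_all_rows_py m S out) := by unfold Spec_generate_all_rows_py; infer_instance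

-- ===== CLAIM (what is proved, stated in full; the proofs are below) =====
def Claim_equal_generate_all_rows_py : Prop := ∀ (m : Int) (S : List Int), Dom_generate_all_rows_py m S → Pre_generate_all_rows_py m S → Spec_generate_all_rows_py m S (generate_all_rows_py m S)

-- ===== LEMMAS AND PROOFS =====
theorem pv_alt_cons (m i : Int) (S : List Int) :
    generate_all_rows_py_alt m (i :: S) = pvStep m (generate_all_rows_py_alt m S) i := by
  simp [generate_all_rows_py_alt, List.foldl_append]

theorem pv_eq_all (m : Int) (S : List Int) :
    generate_all_rows_py m S = generate_all_rows_py_alt m S := by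
  induction S with
  | nil => rfl
  | cons i S ih =>
    rw [pv_alt_cons, ← ih]
    rfl

-- ===== VERDICT (by name: the statement is the Claim_ definition above) =====
theorem generate_all_rows_py_spec : Claim_equal_generate_all_rows_py := by
  intro m S _ _
  exact pv_eq_all m S
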